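-- pv_equiv track=rewrite | github.com/tommydcjung/hb_utilization | remote_load_stat.py | ruche_pop_delay
-- ===== SOURCE A (Python) =====
-- def ruche_pop_delay(rf_x, dx, dy):
--   delay_x = 0
--   curr_x = dx
--
--   while curr_x > 0:
--     if curr_x >= rf_x:
--       curr_x -= rf_x
--       delay_x += 1
--     else:
--       curr_x -= 1
--       delay_x +=1
--
--   return (2*dy)+ (2*delay_x)
-- ===== SOURCE B (Python) =====
-- def ruche_pop_delay(rf_x, dx, dy):
--   delay_x = 0 if dx <= 0 else dx // rf_x + dx % rf_x
--   return 2*dy + 2*delay_x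
-- ===== Notes on version B (the rewrite author's own statement) =====
-- stated objective: faster
-- what changed: Replaces the O(dx) repeated-subtraction loop by the closed form delay_x = dx//rf_x + dx%rf_x (0 when dx <= 0); Pre_ excludes dx > 0 with rf_x <= 0, where A loops forever.
import Mathlib
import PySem

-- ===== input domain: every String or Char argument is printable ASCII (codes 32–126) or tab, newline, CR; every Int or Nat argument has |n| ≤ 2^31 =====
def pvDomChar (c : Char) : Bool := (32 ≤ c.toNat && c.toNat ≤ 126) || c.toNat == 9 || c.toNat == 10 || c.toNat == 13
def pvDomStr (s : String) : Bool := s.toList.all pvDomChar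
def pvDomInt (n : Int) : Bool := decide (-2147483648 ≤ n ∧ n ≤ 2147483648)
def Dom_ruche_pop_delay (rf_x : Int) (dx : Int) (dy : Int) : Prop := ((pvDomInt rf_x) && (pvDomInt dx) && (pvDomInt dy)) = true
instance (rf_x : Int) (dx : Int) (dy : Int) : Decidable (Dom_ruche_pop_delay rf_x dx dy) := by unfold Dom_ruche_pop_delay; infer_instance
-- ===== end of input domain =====

-- B replaces A's O(dx) repeated-subtraction loop by the closed form dx//rf_x + dx%rf_x (faster, asymptotic).


-- ===== PORT A =====
-- the while loop, fuel = dx.toNat (inside Pre_ each iteration decreases curr by ≥ 1,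
-- so the fuel is never exhausted before curr ≤ 0 and the port is exact there)
def pvLoopA (rf_x : Int) : Nat → Int → Int → Int
  | 0, _, delay_x => delay_x
  | fuel + 1, curr_x, delay_x =>
    if curr_x > 0 then
      if curr_x ≥ rf_x then pvLoopA rf_x fuel (curr_x - rf_x) (delay_x + 1)
      else pvLoopA rf_x fuel (curr_x - 1) (delay_x + 1)
    else delay_x

def ruche_pop_delay (rf_x : Int) (dx : Int) (dy : Int) : Int :=
  (2 * dy) + (2 * pvLoopA rf_x dx.toNat dx 0)

-- ===== PORT B =====
def ruche_pop_delay_alt (rf_x : Int) (dx : Int) (dy : Int) : Int :=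
  let delay_x : Int := if dx ≤ 0 then 0 else PySem.Int.floordiv dx rf_x + PySem.Int.mod dx rf_x
  2 * dy + 2 * delay_x

-- ===== PRECONDITION & SPEC =====
-- Pre_ excludes dx > 0 with rf_x ≤ 0: there A's while loop never terminates (no value is returned).
def Pre_ruche_pop_delay (rf_x : Int) (dx : Int) (dy : Int) : Prop := dx ≤ 0 ∨ 1 ≤ rf_x
instance (rf_x : Int) (dx : Int) (dy : Int) : Decidable (Pre_ruche_pop_delay rf_x dx dy) := by unfold Pre_ruche_pop_delay; infer_instance
def pvWitness_ruche_pop_delay : Int × Int × Int := (3, 10, 2)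

def Spec_ruche_pop_delay (rf_x : Int) (dx : Int) (dy : Int) (out : Int) : Prop := out = ruche_pop_delay_alt rf_x dx dy
instance (rf_x : Int) (dx : Int) (dy : Int) (out : Int) : Decidable (Spec_ruche_pop_delay rf_x dx dy out) := by unfold Spec_ruche_pop_delay; infer_instance

-- ===== CLAIM (what is proved, stated in full; the proofs are below) =====
def Claim_equal_ruche_pop_delay : Prop := ∀ (rf_x : Int) (dx : Int) (dy : Int), Dom_ruche_pop_delay rf_x dx dy → Pre_ruche_pop_delay rf_x dx dy → Spec_ruche_pop_delay rf_x dx dy (ruche_pop_delay rf_x dx dy)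

-- ===== LEMMAS AND PROOFS =====
theorem pvLoopA_closed (rf_x : Int) (hrf : 1 ≤ rf_x) :
    ∀ (fuel : Nat) (curr delay : Int), 0 ≤ curr → curr ≤ (fuel : Int) →
      pvLoopA rf_x fuel curr delay = delay + (curr / rf_x + curr % rf_x) := by
  intro fuel
  induction fuel with
  | zero =>
    intro curr delay h0 hf
    have hc : curr = 0 := by omega
    simp [pvLoopA, hc]
  | succ n ih =>
    intro curr delay h0 hf
    by_cases hpos : curr > 0
    · by_cases hge : curr ≥ rf_x
      · have h1 : pvLoopA rf_x (n + 1) curr delay = pvLoopA rf_x n (curr - rf_x) (delay + 1) := by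
          simp [pvLoopA, hpos, hge]
        rw [h1, ih (curr - rf_x) (delay + 1) (by omega) (by push_cast at hf ⊢; omega)]
        have hdiv : (curr - rf_x) / rf_x = curr / rf_x + (-1) := by
          have := Int.add_mul_ediv_right curr (-1) (by omega : rf_x ≠ 0)
          simpa [sub_eq_add_neg, neg_one_mul] using this
        have hmod : (curr - rf_x) % rf_x = curr % rf_x := by
          simpa [sub_eq_add_neg, neg_one_mul] using Int.add_mul_emod_self (a := curr) (b := -1) (c := rf_x)
        rw [hdiv, hmod]; ring
      · have h1 : pvLoopA rf_x (n + 1) curr delay = pvLoopA rf_x n (curr - 1) (delay + 1) := by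
          simp [pvLoopA, hpos, hge]
        rw [h1, ih (curr - 1) (delay + 1) (by omega) (by push_cast at hf ⊢; omega)]
        have hd1 : (curr - 1) / rf_x = 0 := Int.ediv_eq_zero_of_lt (by omega) (by omega)
        have hm1 : (curr - 1) % rf_x = curr - 1 := Int.emod_eq_of_lt (by omega) (by omega)
        have hd2 : curr / rf_x = 0 := Int.ediv_eq_zero_of_lt (by omega) (by omega)
        have hm2 : curr % rf_x = curr := Int.emod_eq_of_lt (by omega) (by omega)
        rw [hd1, hm1, hd2, hm2]; ring
    · have hc : curr = 0 := by omega
      simp [pvLoopA, hc]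

-- ===== VERDICT (by name: the statement is the Claim_ definition above) =====
theorem ruche_pop_delay_spec : Claim_equal_ruche_pop_delay := by
  intro rf_x dx dy _ hpre
  unfold Spec_ruche_pop_delay ruche_pop_delay ruche_pop_delay_alt
  by_cases hdx : dx ≤ 0
  · have ht : dx.toNat = 0 := Int.toNat_of_nonpos hdx
    simp [ht, pvLoopA, hdx]
  · have hrf : 1 ≤ rf_x := by cases hpre with
      | inl h => omega
      | inr h => exact h
    have h0 : (0:Int) ≤ dx := by omega
    have hle : dx ≤ (dx.toNat : Int) := Int.self_le_toNat dx
    rw [pvLoopA_closed rf_x hrf dx.toNat dx 0 h0 hle]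
    rw [PySem.Int.floordiv_eq_ediv_of_pos (by omega), PySem.Int.mod_eq_emod_of_pos (by omega)]
    simp [hdx]
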